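-- pv_equiv track=rewrite | github.com/CUSecLab/2023-CCS-SkillScanner | skillscanner/get_code_inconsistency.py | get_data_collection_intents
-- ===== SOURCE A (Python) =====
-- def get_data_collection_intents(slot_samples):
--     intents = {}
--     for result in slot_samples:
--         intent_name, slot, sample = result
--         index = intent_name
--         if index not in intents:
--             intents[index] = {}
--         if slot['name'] not in intents[index]:
--             intents[index][slot['name']] = []
--         # intent doesn't have sample
--         if sample == "":
--             intents[index][slot['name']].append((slot, -1, sample))
--         # intent has sample like "{name}" and not sure whether data collection
--         elif sample == '{' + slot['name'] + '}':
--             intents[index][slot['name']].append((slot, 2, sample))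
--         # intent has data collection
--         # this is too simple ("i am" is missed, "my cat name is" can cause false positive)
--         elif 'my' in sample.lower() or 'i am' in sample.lower():
--             intents[index][slot['name']].append((slot, 1, sample))
--         # intent has samples but no data collection
--         else:
--             intents[index][slot['name']].append((slot, 0, sample))
--     data_collection_intents = {}
--     for i in intents:
--         data_collection_intents[i] = []
--         for slot in intents[i]:
--             values = [j[1] for j in intents[i][slot]]
--             # the intent doesn't have any sample
--             if -1 in values:
--                 data_collection_intents[i].append((intents[i][slot][0][0], -1))
--             # have sample and data collection
--             elif 1 in values:
--                 data_collection_intents[i].append((intents[i][slot][0][0], 1))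
--             # have sample and no data collection
--             elif 0 in values:
--                 data_collection_intents[i].append((intents[i][slot][0][0], 0))
--             # have sample and not sure whether for data collection ("{name}")
--             else:
--                 data_collection_intents[i].append((intents[i][slot][0][0], 2))
--     return data_collection_intents
-- ===== SOURCE B (Python) =====
-- # Single pass: keep (first-seen slot object, best priority rank) per intent/slot
-- # instead of accumulating all samples and rescanning them in a second pass.
-- _RANK = {-1: 0, 1: 1, 0: 2, 2: 3}
-- _UNRANK = {0: -1, 1: 1, 2: 0, 3: 2}
--
-- def get_data_collection_intents(slot_samples):
--     acc = {}
--     for intent_name, slot, sample in slot_samples: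
--         name = slot['name']
--         if sample == "":
--             code = -1
--         elif sample == '{' + name + '}':
--             code = 2
--         elif 'my' in sample.lower() or 'i am' in sample.lower():
--             code = 1
--         else:
--             code = 0
--         r = _RANK[code]
--         slots = acc.setdefault(intent_name, {})
--         if name in slots:
--             first, best = slots[name]
--             slots[name] = (first, min(best, r))
--         else:
--             slots[name] = (slot, r)
--     return {i: [(first, _UNRANK[r]) for first, r in slots.values()]
--             for i, slots in acc.items()}
-- ===== Notes on version B (the rewrite author's own statement) =====
-- stated objective: alternative
-- what changed: B replaces A's two-pass scheme (group every sample into per-intent/per-slot lists, then rescan each list for -1/1/0 membership) by a single pass that keeps only (first-seen slot object, best priority rank) per intent/slot, mapping the rank back to the code at the end.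
import Mathlib
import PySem

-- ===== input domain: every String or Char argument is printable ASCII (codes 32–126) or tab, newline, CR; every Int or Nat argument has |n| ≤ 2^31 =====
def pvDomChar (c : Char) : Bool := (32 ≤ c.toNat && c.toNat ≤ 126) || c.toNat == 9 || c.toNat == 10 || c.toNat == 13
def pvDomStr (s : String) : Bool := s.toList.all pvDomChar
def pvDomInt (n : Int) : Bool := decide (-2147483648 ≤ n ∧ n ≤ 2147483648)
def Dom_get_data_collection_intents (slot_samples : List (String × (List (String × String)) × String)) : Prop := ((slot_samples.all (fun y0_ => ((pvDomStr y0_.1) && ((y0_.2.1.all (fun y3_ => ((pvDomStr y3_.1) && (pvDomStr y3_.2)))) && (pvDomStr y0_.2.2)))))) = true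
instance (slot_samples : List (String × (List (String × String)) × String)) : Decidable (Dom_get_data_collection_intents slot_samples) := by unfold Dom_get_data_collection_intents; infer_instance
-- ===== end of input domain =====

-- B replaces A's two-pass grouping-then-rescan by a single pass keeping (first slot, best priority rank)
-- per intent/slot; same return value, no speed claim.

-- ===== PORT A =====
-- Two passes: group every sample as (slot, code, sample) into intents[intent][slot_name],
-- then rescan each group's codes (-1 ∈ / 1 ∈ / 0 ∈ / else 2).
def get_data_collection_intents (slot_samples : List (String × (List (String × String)) × String)) : List (String × List ((List (String × String)) × Int)) :=
  let intents : PySem.Dict String (PySem.Dict String (List ((List (String × String)) × Int × String))) :=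
    slot_samples.foldl (fun intents result =>
      -- slot['name']: first match in the association list; KeyError (slot without "name") is excluded by Pre_
      intents.modify result.1 PySem.Dict.empty (fun d =>
        d.modify ((PySem.Dict.mk result.2.1).getD "name" "") [] (fun lst => lst ++
          [(result.2.1,
            (if result.2.2 = "" then (-1 : Int)
             else if result.2.2 = "{" ++ (PySem.Dict.mk result.2.1).getD "name" "" ++ "}" then 2
             else if PySem.Str.isIn "my" (PySem.Str.lower result.2.2) || PySem.Str.isIn "i am" (PySem.Str.lower result.2.2) then 1
             else 0),
            result.2.2)]))) PySem.Dict.empty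
  let dci : PySem.Dict String (List ((List (String × String)) × Int)) :=
    intents.items.foldl (fun acc p =>
      p.2.items.foldl (fun acc q =>
        -- values = [j[1] for j in intents[i][slot]]; group lists are never empty (headD default unreachable)
        acc.modify p.1 [] (fun cur => cur ++
          [((q.2.headD ([], 0, "")).1,
            if (-1 : Int) ∈ q.2.map (fun j => j.2.1) then (-1 : Int)
            else if (1 : Int) ∈ q.2.map (fun j => j.2.1) then 1
            else if (0 : Int) ∈ q.2.map (fun j => j.2.1) then 0
            else 2)]))
        (acc.insert p.1 [])) PySem.Dict.empty
  dci.items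

-- ===== PORT B =====
-- B-side helpers: the priority rank of a code (-1 → 0, 1 → 1, 0 → 2, 2 → 3) and its inverse (_RANK/_UNRANK in Source B)
def pvRankOf (c : Int) : Nat := if c = -1 then 0 else if c = 1 then 1 else if c = 0 then 2 else 3
def pvUnrank (r : Nat) : Int := if r = 0 then -1 else if r = 1 then 1 else if r = 2 then 0 else 2

-- Single pass: per intent/slot keep (first-seen slot object, minimum rank); map ranks back at the end.
def get_data_collection_intents_alt (slot_samples : List (String × (List (String × String)) × String)) : List (String × List ((List (String × String)) × Int)) :=
  let acc : PySem.Dict String (PySem.Dict String ((List (String × String)) × Nat)) :=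
    slot_samples.foldl (fun acc result =>
      acc.modify result.1 PySem.Dict.empty (fun slots =>
        slots.modify ((PySem.Dict.mk result.2.1).getD "name" "")
          (result.2.1,
            pvRankOf (if result.2.2 = "" then (-1 : Int)
             else if result.2.2 = "{" ++ (PySem.Dict.mk result.2.1).getD "name" "" ++ "}" then 2
             else if PySem.Str.isIn "my" (PySem.Str.lower result.2.2) || PySem.Str.isIn "i am" (PySem.Str.lower result.2.2) then 1
             else 0))
          (fun p => (p.1, min p.2
            (pvRankOf (if result.2.2 = "" then (-1 : Int)
             else if result.2.2 = "{" ++ (PySem.Dict.mk result.2.1).getD "name" "" ++ "}" then 2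
             else if PySem.Str.isIn "my" (PySem.Str.lower result.2.2) || PySem.Str.isIn "i am" (PySem.Str.lower result.2.2) then 1
             else 0)))))) PySem.Dict.empty
  acc.items.map (fun p => (p.1, p.2.items.map (fun q => (q.2.1, pvUnrank q.2.2))))

-- ===== PRECONDITION & SPEC =====
-- Pre_ excludes exactly the inputs where Python A raises KeyError: a slot association list without the key "name".
def Pre_get_data_collection_intents (slot_samples : List (String × (List (String × String)) × String)) : Prop :=
  ∀ x ∈ slot_samples, (PySem.Dict.mk x.2.1).contains "name" = true
instance (slot_samples : List (String × (List (String × String)) × String)) : Decidable (Pre_get_data_collection_intents slot_samples) := by unfold Pre_get_data_collection_intents; infer_instance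

def pvWitness_get_data_collection_intents : (List (String × (List (String × String)) × String)) :=
  [("intent", [("name", "city")], "my city")]

def Spec_get_data_collection_intents (slot_samples : List (String × (List (String × String)) × String)) (out : List (String × List ((List (String × String)) × Int))) : Prop := out = get_data_collection_intents_alt slot_samples
instance (slot_samples : List (String × (List (String × String)) × String)) (out : List (String × List ((List (String × String)) × Int))) : Decidable (Spec_get_data_collection_intents slot_samples out) := by unfold Spec_get_data_collection_intents; infer_instance

-- ===== CLAIM (what is proved, stated in full; the proofs are below) =====
def Claim_equal_get_data_collection_intents : Prop := ∀ (slot_samples : List (String × (List (String × String)) × String)), Dom_get_data_collection_intents slot_samples → Pre_get_data_collection_intents slot_samples → Spec_get_data_collection_intents slot_samples (get_data_collection_intents slot_samples)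

-- ===== LEMMAS AND PROOFS =====

-- Shorthands for the element projections both ports share
def pvName (x : String × (List (String × String)) × String) : String := (PySem.Dict.mk x.2.1).getD "name" ""
def pvCode (x : String × (List (String × String)) × String) : Int :=
  if x.2.2 = "" then -1
  else if x.2.2 = "{" ++ pvName x ++ "}" then 2
  else if PySem.Str.isIn "my" (PySem.Str.lower x.2.2) || PySem.Str.isIn "i am" (PySem.Str.lower x.2.2) then 1
  else 0
def pvTrip (x : String × (List (String × String)) × String) : (List (String × String)) × Int × String := (x.2.1, pvCode x, x.2.2)
def pvRank (x : String × (List (String × String)) × String) : Nat := pvRankOf (pvCode x)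

def pvChoose (vals : List Int) : Int :=
  if (-1 : Int) ∈ vals then -1 else if (1 : Int) ∈ vals then 1 else if (0 : Int) ∈ vals then 0 else 2

-- A's and B's inner per-sample steps and first-pass dictionaries
def pvStepA (d : PySem.Dict String (List ((List (String × String)) × Int × String))) (x : String × (List (String × String)) × String) : PySem.Dict String (List ((List (String × String)) × Int × String)) :=
  d.modify (pvName x) [] (fun lst => lst ++ [pvTrip x])
def pvStepB (d : PySem.Dict String ((List (String × String)) × Nat)) (x : String × (List (String × String)) × String) : PySem.Dict String ((List (String × String)) × Nat) :=
  d.modify (pvName x) (x.2.1, pvRank x) (fun p => (p.1, min p.2 (pvRank x)))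
def pvIA (l : List (String × (List (String × String)) × String)) : PySem.Dict String (PySem.Dict String (List ((List (String × String)) × Int × String))) :=
  l.foldl (fun d x => d.modify x.1 PySem.Dict.empty (fun dI => pvStepA dI x)) PySem.Dict.empty
def pvIB (l : List (String × (List (String × String)) × String)) : PySem.Dict String (PySem.Dict String ((List (String × String)) × Nat)) :=
  l.foldl (fun d x => d.modify x.1 PySem.Dict.empty (fun dI => pvStepB dI x)) PySem.Dict.empty

-- the per-group result extractors of the two ports
def pvFA (p : String × List ((List (String × String)) × Int × String)) : (List (String × String)) × Int :=
  ((p.2.headD ([], 0, "")).1, pvChoose (p.2.map (fun j => j.2.1)))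
def pvFB (q : String × ((List (String × String)) × Nat)) : (List (String × String)) × Int :=
  (q.2.1, pvUnrank q.2.2)

-- get? through a fold of modifies (needed in the per-element-default form, which the library does not have)
lemma pv_get?_foldl_modify {κ ν β : Type} [BEq κ] [LawfulBEq κ]
    (l : List β) (key : β → κ) (d0 : β → ν) (f : β → ν → ν) (d : PySem.Dict κ ν) (i : κ) :
    (l.foldl (fun d x => PySem.Dict.modify d (key x) (d0 x) (f x)) d).get? i =
    (l.filter (fun x => key x == i)).foldl (fun v? x => some (f x (v?.getD (d0 x)))) (d.get? i) := by
  induction l generalizing d with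
  | nil => rfl
  | cons x xs ih =>
    simp only [List.foldl_cons, List.filter_cons]
    by_cases h : key x = i
    · simp only [h, beq_self_eq_true, if_pos, List.foldl_cons]
      rw [ih]
      congr 1
      subst h
      show (d.insert (key x) (f x (d.getD (key x) (d0 x)))).get? (key x) = _
      rw [PySem.Dict.get?_insert_self]
      rfl
    · have hb : (key x == i) = false := by simp [h]
      simp only [hb, Bool.false_eq_true, if_neg, not_false_iff]
      rw [ih]
      congr 1
      exact PySem.Dict.get?_insert_of_ne d _ (fun hh => h hh.symm)

lemma pv_optfold_some {β ν : Type} (d0 : β → ν) (f : β → ν → ν) (ys : List β) :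
    ∀ v : ν, ys.foldl (fun v? x => some (f x (v?.getD (d0 x)))) (some v) = some (ys.foldl (fun v x => f x v) v) := by
  induction ys with
  | nil => intro v; rfl
  | cons y ys ih => intro v; simp only [List.foldl_cons, Option.getD_some]; exact ih _

lemma pv_optfold_none {β ν : Type} (d0 : β → ν) (f : β → ν → ν) (y : β) (ys : List β) :
    (y :: ys).foldl (fun v? x => some (f x (v?.getD (d0 x)))) none = some (ys.foldl (fun v x => f x v) (f y (d0 y))) := by
  simp only [List.foldl_cons, Option.getD_none]
  exact pv_optfold_some d0 f ys _

lemma pv_get?_isSome_of_mem_keys {κ ν : Type} [BEq κ] [LawfulBEq κ] (d : PySem.Dict κ ν) (i : κ)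
    (h : i ∈ d.keys) : (d.get? i).isSome := by
  obtain ⟨p, hp, he⟩ := List.mem_map.mp h
  simp only [PySem.Dict.get?, Option.isSome_map]
  exact List.find?_isSome.mpr ⟨p, hp, by simp [he]⟩

-- A's second pass over one group: repeated append-modify at a freshly inserted key is one insert
lemma pv_foldl_modify_insert {κ δ γ : Type} [BEq κ] [LawfulBEq κ] (its : List γ) (g : γ → δ)
    (i : κ) : ∀ (acc : PySem.Dict κ (List δ)) (v : List δ),
    its.foldl (fun a it => a.modify i [] (fun cur => cur ++ [g it])) (acc.insert i v) = acc.insert i (v ++ its.map g) := by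
  induction its with
  | nil => intro acc v; simp
  | cons it its ih =>
    intro acc v
    simp only [List.foldl_cons]
    have h1 : (acc.insert i v).modify i [] (fun cur => cur ++ [g it]) = acc.insert i (v ++ [g it]) := by
      show (acc.insert i v).insert i (((acc.insert i v).getD i []) ++ [g it]) = _
      rw [PySem.Dict.getD_insert_self, PySem.Dict.insert_insert_self]
    rw [h1, ih]
    simp

-- the min-fold keeps the first slot and folds min over ranks
lemma pv_minfold {α β : Type} (r : β → Nat) (zs : List β) :
    ∀ (s0 : α) (r0 : Nat),
    zs.foldl (fun p x => (p.1, min p.2 (r x))) (s0, r0) = (s0, zs.foldl (fun m x => min m (r x)) r0) := by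
  induction zs with
  | nil => intro s0 r0; rfl
  | cons z zs ih => intro s0 r0; simp only [List.foldl_cons]; exact ih s0 _

lemma pvRankOf_le (c : Int) : pvRankOf c ≤ 3 := by
  unfold pvRankOf; split_ifs <;> omega

lemma pvRankOf_eq_zero_iff (c : Int) : pvRankOf c = 0 ↔ c = -1 := by
  unfold pvRankOf; split_ifs <;> simp_all
lemma pvRankOf_eq_one_iff (c : Int) : pvRankOf c = 1 ↔ c = 1 := by
  unfold pvRankOf; split_ifs <;> simp_all
lemma pvRankOf_eq_two_iff (c : Int) : pvRankOf c = 2 ↔ c = 0 := by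
  unfold pvRankOf; split_ifs <;> simp_all

lemma pv_minfold_bound (cs : List Int) : ∀ (r0 : Nat),
    (cs.foldl (fun m c => min m (pvRankOf c)) r0 = r0 ∨ ∃ c ∈ cs, cs.foldl (fun m c => min m (pvRankOf c)) r0 = pvRankOf c) ∧
    cs.foldl (fun m c => min m (pvRankOf c)) r0 ≤ r0 ∧
    ∀ c ∈ cs, cs.foldl (fun m c => min m (pvRankOf c)) r0 ≤ pvRankOf c := by
  induction cs with
  | nil => intro r0; exact ⟨Or.inl rfl, le_refl _, by simp⟩
  | cons c cs ih =>
    intro r0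
    simp only [List.foldl_cons]
    obtain ⟨hw, hle, hall⟩ := ih (min r0 (pvRankOf c))
    refine ⟨?_, le_trans hle (min_le_left _ _), ?_⟩
    · rcases hw with hw | ⟨d, hd, he⟩
      · rcases Nat.le_total r0 (pvRankOf c) with h | h
        · exact Or.inl (by rw [hw]; omega)
        · exact Or.inr ⟨c, List.mem_cons_self, by rw [hw]; omega⟩
      · exact Or.inr ⟨d, List.mem_cons_of_mem _ hd, he⟩
    · intro d hd
      rcases List.mem_cons.mp hd with rfl | hd
      · exact le_trans hle (min_le_right _ _)
      · exact hall d hd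

-- the core: A's membership cascade over a group's codes = B's min-rank mapped back
lemma pv_choose_eq (c : Int) (cs : List Int) :
    pvChoose (c :: cs) = pvUnrank (cs.foldl (fun m d => min m (pvRankOf d)) (pvRankOf c)) := by
  obtain ⟨hw, hle, hall⟩ := pv_minfold_bound cs (pvRankOf c)
  set m := cs.foldl (fun m d => min m (pvRankOf d)) (pvRankOf c) with hm
  have hw' : ∃ d ∈ c :: cs, m = pvRankOf d := by
    rcases hw with h | ⟨d, hd, he⟩
    · exact ⟨c, List.mem_cons_self, h⟩
    · exact ⟨d, List.mem_cons_of_mem _ hd, he⟩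
  have hall' : ∀ d ∈ c :: cs, m ≤ pvRankOf d := by
    intro d hd
    rcases List.mem_cons.mp hd with rfl | hd
    · exact hle
    · exact hall d hd
  unfold pvChoose pvUnrank
  by_cases h1 : (-1 : Int) ∈ c :: cs
  · have hm0 : m = 0 := by
      have := hall' _ h1
      simp [pvRankOf] at this
      omega
    simp [h1, hm0]
  · by_cases h2 : (1 : Int) ∈ c :: cs
    · have hm1 : m = 1 := by
        have hle1 : m ≤ 1 := by have := hall' _ h2; simpa [pvRankOf] using this
        have hne0 : m ≠ 0 := by
          intro h0
          obtain ⟨d, hd, he⟩ := hw'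
          exact h1 (by rwa [(pvRankOf_eq_zero_iff d).mp (by omega)] at hd)
        omega
      simp [h1, h2, hm1]
    · by_cases h3 : (0 : Int) ∈ c :: cs
      · have hm2 : m = 2 := by
          have hle2 : m ≤ 2 := by have := hall' _ h3; simpa [pvRankOf] using this
          have hne0 : m ≠ 0 := by
            intro h0
            obtain ⟨d, hd, he⟩ := hw'
            exact h1 (by rwa [(pvRankOf_eq_zero_iff d).mp (by omega)] at hd)
          have hne1 : m ≠ 1 := by
            intro h0
            obtain ⟨d, hd, he⟩ := hw'
            exact h2 (by rwa [(pvRankOf_eq_one_iff d).mp (by omega)] at hd)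
          omega
        simp [h1, h2, h3, hm2]
      · have hm3 : m = 3 := by
          obtain ⟨d, hd, he⟩ := hw'
          have h3' : m ≤ 3 := he ▸ pvRankOf_le d
          have hne0 : m ≠ 0 := fun h0 =>
            h1 (by rwa [(pvRankOf_eq_zero_iff d).mp (by omega)] at hd)
          have hne1 : m ≠ 1 := fun h0 =>
            h2 (by rwa [(pvRankOf_eq_one_iff d).mp (by omega)] at hd)
          have hne2 : m ≠ 2 := fun h0 =>
            h3 (by rwa [(pvRankOf_eq_two_iff d).mp (by omega)] at hd)
          omega
        simp [h1, h2, h3, hm3]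

-- the two first-pass inner dictionaries over the same per-intent sample list yield the same groups
lemma pv_inner_get?A (li : List (String × (List (String × String)) × String)) (s : String) :
    (li.foldl pvStepA PySem.Dict.empty).get? s =
    (li.filter (fun x => pvName x == s)).foldl (fun v? x => some ((v?.getD []) ++ [pvTrip x])) none :=
  pv_get?_foldl_modify li pvName (fun _ => []) (fun x lst => lst ++ [pvTrip x]) PySem.Dict.empty s

lemma pv_inner_get?B (li : List (String × (List (String × String)) × String)) (s : String) :
    (li.foldl pvStepB PySem.Dict.empty).get? s =
    (li.filter (fun x => pvName x == s)).foldl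
      (fun v? x => some (((v?.getD (x.2.1, pvRank x)).1, min (v?.getD (x.2.1, pvRank x)).2 (pvRank x)))) none :=
  pv_get?_foldl_modify li pvName (fun x => (x.2.1, pvRank x)) (fun x p => (p.1, min p.2 (pvRank x))) PySem.Dict.empty s

lemma pv_inner (li : List (String × (List (String × String)) × String)) :
    (li.foldl pvStepA PySem.Dict.empty).items.map pvFA = (li.foldl pvStepB PySem.Dict.empty).items.map pvFB := by
  have hkeysA : (li.foldl pvStepA PySem.Dict.empty).keys = PySem.Set.update (PySem.Dict.empty : PySem.Dict String (List ((List (String × String)) × Int × String))).keys (li.map pvName) :=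
    PySem.Dict.keys_foldl_insert_key li pvName
      (fun d x => (d.getD (pvName x) []) ++ [pvTrip x]) PySem.Dict.empty
  have hkeysB : (li.foldl pvStepB PySem.Dict.empty).keys = PySem.Set.update (PySem.Dict.empty : PySem.Dict String ((List (String × String)) × Nat)).keys (li.map pvName) :=
    PySem.Dict.keys_foldl_insert_key li pvName
      (fun d x => ((d.getD (pvName x) (x.2.1, pvRank x)).1, min (d.getD (pvName x) (x.2.1, pvRank x)).2 (pvRank x))) PySem.Dict.empty
  have hkeys : (li.foldl pvStepA PySem.Dict.empty).keys = (li.foldl pvStepB PySem.Dict.empty).keys :=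
    hkeysA.trans hkeysB.symm
  have hnodupA : (li.foldl pvStepA PySem.Dict.empty).keys.Nodup :=
    PySem.Dict.nodup_keys_foldl_modify_key li pvName []
      (fun _ x lst => lst ++ [pvTrip x]) PySem.Dict.empty List.nodup_nil
  have hnodupB : (li.foldl pvStepB PySem.Dict.empty).keys.Nodup := hkeys ▸ hnodupA
  rw [PySem.Dict.items_eq_map_keys _ hnodupA ([] : List ((List (String × String)) × Int × String)),
      PySem.Dict.items_eq_map_keys _ hnodupB (([], 0) : (List (String × String)) × Nat),
      List.map_map, List.map_map, hkeys]
  apply List.map_congr_left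
  intro s hs
  have hsome : ((li.foldl pvStepA PySem.Dict.empty).get? s).isSome := by
    apply pv_get?_isSome_of_mem_keys
    rw [hkeys]; exact hs
  rcases hfil : li.filter (fun x => pvName x == s) with _ | ⟨z, zs⟩
  · rw [pv_inner_get?A, hfil] at hsome
    simp at hsome
  · have hA : (li.foldl pvStepA PySem.Dict.empty).getD s [] = (z :: zs).map pvTrip := by
      show ((li.foldl pvStepA PySem.Dict.empty).get? s).getD [] = _
      rw [pv_inner_get?A, hfil,
          pv_optfold_none (fun _ => []) (fun x lst => lst ++ [pvTrip x]) z zs]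
      simp only [Option.getD_some]
      rw [PySem.List.foldl_append_singleton_eq_map pvTrip zs ([] ++ [pvTrip z])]
      simp
    have hB : (li.foldl pvStepB PySem.Dict.empty).getD s (([], 0) : (List (String × String)) × Nat) =
        (z.2.1, zs.foldl (fun m x => min m (pvRank x)) (pvRank z)) := by
      show ((li.foldl pvStepB PySem.Dict.empty).get? s).getD _ = _
      rw [pv_inner_get?B, hfil,
          pv_optfold_none (fun x => (x.2.1, pvRank x)) (fun x p => (p.1, min p.2 (pvRank x))) z zs]
      simp only [Option.getD_some, Nat.min_self]
      exact pv_minfold pvRank zs z.2.1 (pvRank z)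
    simp only [Function.comp_apply]
    rw [hA, hB]
    unfold pvFA pvFB
    simp only [List.map_cons, List.headD_cons]
    refine congrArg (Prod.mk (pvTrip z).1) ?_
    have hmap : ((pvTrip z).2.1 : Int) :: (zs.map pvTrip).map (fun j => j.2.1) = pvCode z :: zs.map pvCode := by
      rw [List.map_map]; rfl
    rw [hmap, pv_choose_eq (pvCode z) (zs.map pvCode), List.foldl_map]
    rfl

lemma pv_A_eq (l : List (String × (List (String × String)) × String)) :
    get_data_collection_intents l = (pvIA l).items.map (fun p => (p.1, p.2.items.map pvFA)) := by
  show ((pvIA l).items.foldl (fun acc p =>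
      p.2.items.foldl (fun acc q => acc.modify p.1 [] (fun cur => cur ++ [pvFA q])) (acc.insert p.1 []))
      PySem.Dict.empty).items = _
  have hfun : (fun (acc : PySem.Dict String (List ((List (String × String)) × Int)))
        (p : String × PySem.Dict String (List ((List (String × String)) × Int × String))) =>
      p.2.items.foldl (fun acc q => acc.modify p.1 [] (fun cur => cur ++ [pvFA q])) (acc.insert p.1 [])) =
      (fun acc p => acc.insert p.1 (p.2.items.map pvFA)) := by
    funext acc p
    rw [pv_foldl_modify_insert p.2.items pvFA p.1 acc []]
    simp
  rw [hfun]
  have hnodup : ((pvIA l).items.map (fun p => p.1)).Nodup :=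
    PySem.Dict.nodup_keys_foldl_modify_key l (fun x => x.1) PySem.Dict.empty
      (fun _ x dI => pvStepA dI x) PySem.Dict.empty List.nodup_nil
  rw [PySem.Dict.items_foldl_insert_fresh (pvIA l).items (fun p => p.1)
      (fun p => p.2.items.map pvFA) PySem.Dict.empty (fun a _ => rfl) hnodup]
  rfl

lemma pv_B_eq (l : List (String × (List (String × String)) × String)) :
    get_data_collection_intents_alt l = (pvIB l).items.map (fun p => (p.1, p.2.items.map pvFB)) := rfl

lemma pv_outer_get?A (l : List (String × (List (String × String)) × String)) (i : String) :
    (pvIA l).get? i = (l.filter (fun x => x.1 == i)).foldl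
      (fun v? x => some (pvStepA (v?.getD PySem.Dict.empty) x)) none :=
  pv_get?_foldl_modify l (fun x => x.1) (fun _ => PySem.Dict.empty) (fun x dI => pvStepA dI x) PySem.Dict.empty i

lemma pv_outer_get?B (l : List (String × (List (String × String)) × String)) (i : String) :
    (pvIB l).get? i = (l.filter (fun x => x.1 == i)).foldl
      (fun v? x => some (pvStepB (v?.getD PySem.Dict.empty) x)) none :=
  pv_get?_foldl_modify l (fun x => x.1) (fun _ => PySem.Dict.empty) (fun x dI => pvStepB dI x) PySem.Dict.empty i

lemma pv_main (l : List (String × (List (String × String)) × String)) :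
    get_data_collection_intents l = get_data_collection_intents_alt l := by
  rw [pv_A_eq, pv_B_eq]
  have hkeysA : (pvIA l).keys = PySem.Set.update (PySem.Dict.empty : PySem.Dict String (PySem.Dict String (List ((List (String × String)) × Int × String)))).keys (l.map (fun x => x.1)) :=
    PySem.Dict.keys_foldl_insert_key l (fun x => x.1)
      (fun d x => pvStepA (d.getD x.1 PySem.Dict.empty) x) PySem.Dict.empty
  have hkeysB : (pvIB l).keys = PySem.Set.update (PySem.Dict.empty : PySem.Dict String (PySem.Dict String ((List (String × String)) × Nat))).keys (l.map (fun x => x.1)) :=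
    PySem.Dict.keys_foldl_insert_key l (fun x => x.1)
      (fun d x => pvStepB (d.getD x.1 PySem.Dict.empty) x) PySem.Dict.empty
  have hkeys : (pvIA l).keys = (pvIB l).keys := hkeysA.trans hkeysB.symm
  have hnodupA : (pvIA l).keys.Nodup :=
    PySem.Dict.nodup_keys_foldl_modify_key l (fun x => x.1) PySem.Dict.empty
      (fun _ x dI => pvStepA dI x) PySem.Dict.empty List.nodup_nil
  have hnodupB : (pvIB l).keys.Nodup := hkeys ▸ hnodupA
  rw [PySem.Dict.items_eq_map_keys (pvIA l) hnodupA PySem.Dict.empty,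
      PySem.Dict.items_eq_map_keys (pvIB l) hnodupB PySem.Dict.empty,
      List.map_map, List.map_map, hkeys]
  apply List.map_congr_left
  intro i hi
  have hsome : ((pvIA l).get? i).isSome := by
    apply pv_get?_isSome_of_mem_keys
    rw [hkeys]; exact hi
  rcases hfil : l.filter (fun x => x.1 == i) with _ | ⟨y, ys⟩
  · rw [pv_outer_get?A, hfil] at hsome
    simp at hsome
  · have hA : (pvIA l).getD i PySem.Dict.empty = (y :: ys).foldl pvStepA PySem.Dict.empty := by
      show ((pvIA l).get? i).getD _ = _
      rw [pv_outer_get?A, hfil,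
          pv_optfold_none (fun _ => PySem.Dict.empty) (fun x dI => pvStepA dI x) y ys]
      rfl
    have hB : (pvIB l).getD i PySem.Dict.empty = (y :: ys).foldl pvStepB PySem.Dict.empty := by
      show ((pvIB l).get? i).getD _ = _
      rw [pv_outer_get?B, hfil,
          pv_optfold_none (fun _ => PySem.Dict.empty) (fun x dI => pvStepB dI x) y ys]
      rfl
    simp only [Function.comp_apply]
    rw [hA, hB]
    exact congrArg (Prod.mk i) (pv_inner (y :: ys))

-- ===== VERDICT (by name: the statement is the Claim_ definition above) =====
theorem get_data_collection_intents_spec : Claim_equal_get_data_collection_intents := by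
  intro l _ _
  unfold Spec_get_data_collection_intents
  exact pv_main l
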